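-- pv_equiv track=rewrite | github.com/mflova/lazy-type-hint | dynamic_pyi_generator/typed_dict_generator.py | _sequence_contains_same_dicts
-- ===== SOURCE A (Python) =====
-- from typing import (
--     Any,
--     Callable,
--     FrozenSet,
--     Iterable,
--     List,
--     Mapping,
--     Sequence,
--     Set,
--     Tuple,
--     Type,
--     Union,
--     cast,
-- )
--
-- def _sequence_contains_same_dicts(data: Sequence[Any]) -> bool:
--     """
--     Check if the given sequence contains only dictionaries with the same keys.
--
--     Args:
--         data (Sequence[object]): The sequence to check.
--
--     Returns:
--         bool: True if all elements in the sequence are dictionaries with the same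
--             keys, False otherwise.
--     """
--     if any(not isinstance(element, dict) for element in data):
--         return False
--     if not data:
--         return False
--     data = cast(Sequence[Mapping[str, Any]], data)
--     first_element_keys = data[0].keys()
--     return all(element.keys() == first_element_keys for element in data[1:])
-- ===== SOURCE B (Python) =====
-- def _sequence_contains_same_dicts(data):
--     """Same check via distinct key-signatures: one frozenset signature per element,
--     then decide by counting distinct signatures instead of comparing to an anchor."""
--     if any(not isinstance(element, dict) for element in data):
--         return False
--     return bool(data) and len({frozenset(element) for element in data}) == 1
-- ===== Notes on version B (the rewrite author's own statement) =====
-- stated objective: idiomatic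
-- what changed: Instead of anchoring on the first element's keys and comparing every other element's keys to it, B builds the set of frozenset key-signatures of all elements and returns True iff the sequence is non-empty and exactly one distinct signature exists.
import Mathlib
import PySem

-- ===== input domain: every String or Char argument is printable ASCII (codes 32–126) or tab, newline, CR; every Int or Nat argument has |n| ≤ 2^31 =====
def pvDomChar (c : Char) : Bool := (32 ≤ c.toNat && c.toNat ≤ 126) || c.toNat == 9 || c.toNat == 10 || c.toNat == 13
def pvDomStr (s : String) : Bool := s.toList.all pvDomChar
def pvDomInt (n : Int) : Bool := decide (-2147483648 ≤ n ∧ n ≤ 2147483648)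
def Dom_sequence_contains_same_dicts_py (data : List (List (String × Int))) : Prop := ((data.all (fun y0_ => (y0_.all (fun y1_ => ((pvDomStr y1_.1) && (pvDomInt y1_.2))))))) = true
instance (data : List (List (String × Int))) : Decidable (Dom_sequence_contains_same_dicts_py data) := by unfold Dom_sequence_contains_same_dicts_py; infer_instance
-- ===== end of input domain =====

-- B replaces A's compare-every-element-to-the-first-element's-keys pass by counting
-- distinct key-signatures (one frozenset per element, exactly one distinct) — objective: idiomatic.

-- ===== PORT A =====
-- element.keys(): a dict's keys in insertion order, first occurrences (duplicate keys overwrite in place)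
def pvKeysA (e : List (String × Int)) : List String := PySem.List.dedup (e.map Prod.fst)

def sequence_contains_same_dicts_py (data : List (List (String × Int))) : Bool :=
  -- 'any(not isinstance(element, dict) for element in data)': every element is a dict under the type convention
  if data.any (fun _element => false) then false
  else if data.isEmpty then false
  else
    match data with
    | [] => false
    | first :: _ =>
      -- first_element_keys = data[0].keys(); 'element.keys() == first_element_keys' compares as sets
      (PySem.List.slice data (some 1) none).all
        (fun element => PySem.Set.equal (pvKeysA element) (pvKeysA first))

-- ===== PORT B =====
-- frozenset(element): the element's distinct keys; canonically represented as the sorted list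
-- (frozenset equality is set equality, so the canonical form is exact)
def pvSig (e : List (String × Int)) : List String :=
  PySem.List.sorted (PySem.List.dedup (e.map Prod.fst)) (fun k => k) false

def sequence_contains_same_dicts_py_alt (data : List (List (String × Int))) : Bool :=
  if data.any (fun _element => false) then false
  else !data.isEmpty && (PySem.Set.ofList (data.map pvSig)).length == 1

-- ===== PRECONDITION & SPEC =====
def Spec_sequence_contains_same_dicts_py (data : List (List (String × Int))) (out : Bool) : Prop := out = sequence_contains_same_dicts_py_alt data
instance (data : List (List (String × Int))) (out : Bool) : Decidable (Spec_sequence_contains_same_dicts_py data out) := by unfold Spec_sequence_contains_same_dicts_py; infer_instance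

-- ===== CLAIM (what is proved, stated in full; the proofs are below) =====
def Claim_equal_sequence_contains_same_dicts_py : Prop := ∀ (data : List (List (String × Int))), Dom_sequence_contains_same_dicts_py data → Spec_sequence_contains_same_dicts_py data (sequence_contains_same_dicts_py data)

-- ===== LEMMAS AND PROOFS =====

-- Set.equal of two key lists is exactly equality of their canonical (sorted) signatures
theorem pvEqual_iff_sig (e f : List (String × Int)) :
    PySem.Set.equal (pvKeysA e) (pvKeysA f) = true ↔ pvSig e = pvSig f := by
  rw [PySem.Set.equal_iff]
  unfold pvSig pvKeysA
  rw [PySem.List.sorted_id_eq_sorted_id_iff_perm,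
      List.perm_ext_iff_of_nodup (PySem.List.nodup_dedup _) (PySem.List.nodup_dedup _)]

theorem pvFoldl_add_len_mono (l : List (List String)) (acc : PySem.Set (List String)) :
    acc.length ≤ (l.foldl PySem.Set.add acc).length := by
  induction l generalizing acc with
  | nil => simp
  | cons y ys ih =>
    refine le_trans ?_ (ih (PySem.Set.add acc y))
    simp [PySem.Set.add]
    split <;> simp

theorem pvFoldl_add_singleton (xs : List (List String)) (x : List String) :
    ((xs.foldl PySem.Set.add [x]).length = 1) ↔ (∀ y ∈ xs, y = x) := by
  induction xs with
  | nil => simp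
  | cons y ys ih =>
    by_cases h : y = x
    · subst h
      simpa [List.foldl_cons, PySem.Set.add, PySem.Set.contains] using ih
    · constructor
      · intro hlen
        exfalso
        have h2 : 2 ≤ (ys.foldl PySem.Set.add [x, y]).length := by
          simpa using pvFoldl_add_len_mono ys [x, y]
        have hx : ys.foldl PySem.Set.add (PySem.Set.add [x] y) = ys.foldl PySem.Set.add [x, y] := by
          simp [PySem.Set.add, PySem.Set.contains, h]
        simp only [List.foldl_cons, hx] at hlen
        omega
      · intro hall
        exact absurd (hall y (by simp)) h

-- ===== VERDICT (by name: the statement is the Claim_ definition above) =====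
theorem sequence_contains_same_dicts_py_spec : Claim_equal_sequence_contains_same_dicts_py := by
  intro data _hdom
  unfold Spec_sequence_contains_same_dicts_py
  unfold sequence_contains_same_dicts_py sequence_contains_same_dicts_py_alt
  cases data with
  | nil => simp
  | cons first rest =>
    simp [PySem.List.slice_from_one]
    rw [Bool.eq_iff_iff]
    simp only [List.all_eq_true, beq_iff_eq]
    rw [show PySem.Set.ofList (pvSig first :: rest.map pvSig)
          = (rest.map pvSig).foldl PySem.Set.add [pvSig first] from by
        simp [PySem.Set.ofList_eq_foldl, PySem.Set.add, PySem.Set.contains]]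
    rw [pvFoldl_add_singleton]
    constructor
    · intro h s hs
      obtain ⟨e, he, rfl⟩ := List.mem_map.mp hs
      exact (pvEqual_iff_sig e first).mp (h e he)
    · intro h e he
      exact (pvEqual_iff_sig e first).mpr (h (pvSig e) (List.mem_map_of_mem he))
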